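-- pv_equiv track=rewrite | github.com/idwer/advent-of-code-2021 | puzzle_03/solution_03-part-01.py | get_gamma_rate
-- ===== SOURCE A (Python) =====
-- def get_gamma_rate(rows: list, line_width: int) -> int:
--     gamma_rate = 0
--
--     zeroes = 0
--     ones = 0
--
--     for position in range(0, line_width):
--         for _, line in enumerate(rows):
--             match line[position]:
--                 case '0':
--                     zeroes += 1
--                 case '1':
--                     ones += 1
--
--         if position > 0:
--             gamma_rate <<= 1
--
--         if ones > zeroes:
--             gamma_rate |= 1
--
--         ones = 0
--         zeroes = 0
--
--     return gamma_rate
-- ===== SOURCE B (Python) =====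
-- def get_gamma_rate(rows: list, line_width: int) -> int:
--     # One row-major pass builds per-column counts, then a second pass folds them.
--     ones = [0] * line_width
--     zeroes = [0] * line_width
--     for line in rows:
--         ones = [o + (1 if line[p] == '1' else 0) for p, o in enumerate(ones)]
--         zeroes = [z + (1 if line[p] == '0' else 0) for p, z in enumerate(zeroes)]
--     gamma = 0
--     for p in range(line_width):
--         gamma = (gamma << 1) | (1 if ones[p] > zeroes[p] else 0)
--     return gamma
-- ===== Notes on version B (the rewrite author's own statement) =====
-- stated objective: alternative
-- what changed: Column-major rescanning of all rows per bit position is replaced by a single row-major pass that builds per-column ones/zeroes count arrays, which a separate pass then folds MSB-first into the integer.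
import Mathlib
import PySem

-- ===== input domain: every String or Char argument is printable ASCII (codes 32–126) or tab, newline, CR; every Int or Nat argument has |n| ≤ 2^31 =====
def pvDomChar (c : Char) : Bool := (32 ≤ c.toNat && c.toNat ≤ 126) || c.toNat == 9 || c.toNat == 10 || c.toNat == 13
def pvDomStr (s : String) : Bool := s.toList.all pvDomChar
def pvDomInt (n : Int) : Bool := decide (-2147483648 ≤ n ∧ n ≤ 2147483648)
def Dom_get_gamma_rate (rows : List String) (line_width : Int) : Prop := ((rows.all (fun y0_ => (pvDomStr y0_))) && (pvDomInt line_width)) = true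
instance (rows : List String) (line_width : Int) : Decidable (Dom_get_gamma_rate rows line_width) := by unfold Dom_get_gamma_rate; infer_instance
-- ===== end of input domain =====

-- B replaces A's column-major rescanning by one row-major counting pass plus a fold over the counts; same cost, different structure.

-- ===== PORT A =====
-- A: for each position, rescan all rows counting '0'/'1' at that column, then shift/or into gamma.
def get_gamma_rate (rows : List String) (line_width : Int) : Int :=
  (PySem.List.pyRange 0 line_width 1).foldl (fun gamma position =>
    let zo : Int × Int := rows.foldl (fun (zo : Int × Int) line =>
      let c? := PySem.Str.pyGet? line position
      if c? = some '0' then (zo.1 + 1, zo.2)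
      else if c? = some '1' then (zo.1, zo.2 + 1)
      else zo) (0, 0)
    -- gamma <<= 1 : Python's << 1 on int is exactly *2
    let gamma := if position > 0 then gamma * 2 else gamma
    -- gamma |= 1 : gamma is even here (0 at position 0, just doubled otherwise), so |= 1 is exactly + 1
    if zo.2 > zo.1 then gamma + 1 else gamma) 0

-- ===== PORT B =====
-- '[o + (1 if line[p] == '1' else 0) for p, o in enumerate(ones)]' (an out-of-range index occurs only outside Pre_)
def pvBump (target : Char) (line : String) (cnt : List Int) : List Int :=
  (PySem.List.enumerate cnt).map (fun po =>
    po.2 + (if PySem.Str.pyGet? line po.1 = some target then 1 else 0))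

def get_gamma_rate_alt (rows : List String) (line_width : Int) : Int :=
  let init : List Int := List.replicate line_width.toNat 0  -- [0]*line_width (exact: negative width gives [])
  let cnts : List Int × List Int :=
    rows.foldl (fun (c : List Int × List Int) line => (pvBump '1' line c.1, pvBump '0' line c.2)) (init, init)
  (PySem.List.pyRange 0 line_width 1).foldl (fun gamma p =>
    -- (gamma << 1) | bit : gamma*2 is even, so | bit is exactly + bit
    gamma * 2 + (if PySem.List.pyGetD cnts.1 p 0 > PySem.List.pyGetD cnts.2 p 0 then 1 else 0)) 0

-- ===== PRECONDITION & SPEC =====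
-- Pre_ excludes exactly the inputs where Python A raises IndexError: a positive width with some row shorter than it.
def Pre_get_gamma_rate (rows : List String) (line_width : Int) : Prop :=
  line_width ≤ 0 ∨ ∀ r ∈ rows, line_width ≤ PySem.Str.len r
instance (rows : List String) (line_width : Int) : Decidable (Pre_get_gamma_rate rows line_width) := by
  unfold Pre_get_gamma_rate; infer_instance
def pvWitness_get_gamma_rate : List String × Int := (["101", "110", "100"], 3)

def Spec_get_gamma_rate (rows : List String) (line_width : Int) (out : Int) : Prop := out = get_gamma_rate_alt rows line_width
instance (rows : List String) (line_width : Int) (out : Int) : Decidable (Spec_get_gamma_rate rows line_width out) := by unfold Spec_get_gamma_rate; infer_instance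

-- ===== CLAIM (what is proved, stated in full; the proofs are below) =====
def Claim_equal_get_gamma_rate : Prop := ∀ (rows : List String) (line_width : Int), Dom_get_gamma_rate rows line_width → Pre_get_gamma_rate rows line_width → Spec_get_gamma_rate rows line_width (get_gamma_rate rows line_width)

-- ===== LEMMAS AND PROOFS =====

-- number of rows whose character at column p equals target
def pvColCount (target : Char) (rows : List String) (p : Int) : Int :=
  rows.foldl (fun a line => a + (if PySem.Str.pyGet? line p = some target then 1 else 0)) 0

theorem pvColCount_cons (target : Char) (r : String) (rows : List String) (p : Int) :
    pvColCount target (r :: rows) p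
      = (if PySem.Str.pyGet? r p = some target then 1 else 0) + pvColCount target rows p := by
  unfold pvColCount
  simp only [List.foldl_cons]
  rw [PySem.List.foldl_add, PySem.List.foldl_add]
  ring

-- A's inner rescan of the rows computes the two column counts
theorem pvInnerCount (rows : List String) (p : Int) (z o : Int) :
    rows.foldl (fun (zo : Int × Int) line =>
      if PySem.List.pyGet? line.toList p = some '0' then (zo.1 + 1, zo.2)
      else if PySem.List.pyGet? line.toList p = some '1' then (zo.1, zo.2 + 1)
      else zo) (z, o)
      = (z + pvColCount '0' rows p, o + pvColCount '1' rows p) := by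
  induction rows generalizing z o with
  | nil => simp [pvColCount]
  | cons r rs ih =>
    simp only [List.foldl_cons]
    rw [pvColCount_cons, pvColCount_cons]
    rcases h : PySem.List.pyGet? r.toList p with _ | c
    · simp [h, ih, Prod.ext_iff] <;> omega
    · by_cases hc0 : c = '0'
      · subst hc0; simp [h, ih, Prod.ext_iff] <;> omega
      · by_cases hc1 : c = '1'
        · subst hc1; simp [h, ih, Prod.ext_iff] <;> omega
        · simp [h, hc0, hc1, ih, Prod.ext_iff] <;> omega

theorem pvBump_length (target : Char) (line : String) (cnt : List Int) :
    (pvBump target line cnt).length = cnt.length := by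
  simp [pvBump, PySem.List.length_enumerate]

theorem pvBump_getD (target : Char) (line : String) (cnt : List Int) (k : Nat)
    (hk : k < cnt.length) :
    (pvBump target line cnt).getD k 0
      = cnt.getD k 0 + (if PySem.Str.pyGet? line (k : Int) = some target then 1 else 0) := by
  simp [pvBump, List.getD_eq_getElem?_getD, PySem.List.getElem?_enumerate,
    List.getElem?_eq_getElem hk]

-- the row-major counting loop ends with each column's count added in
theorem pvFoldBump_getD (target : Char) (rows : List String) :
    ∀ (cnt : List Int) (k : Nat), k < cnt.length →
      (rows.foldl (fun c line => pvBump target line c) cnt).getD k 0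
        = cnt.getD k 0 + pvColCount target rows (k : Int) := by
  induction rows with
  | nil => intro cnt k hk; simp [pvColCount]
  | cons r rs ih =>
    intro cnt k hk
    simp only [List.foldl_cons]
    rw [ih _ k (by rw [pvBump_length]; exact hk), pvBump_getD target r cnt k hk, pvColCount_cons]
    ring

-- past the first position, A's shift-guard is always taken, so its step is B's step
theorem pvTail (bit : Int → Prop) [inst : DecidablePred bit] (a b : Int) (ha : 1 ≤ a) (γ : Int) :
    (PySem.List.pyRange a b 1).foldl (fun g p =>
        if bit p then (if p > 0 then g * 2 else g) + 1 else (if p > 0 then g * 2 else g)) γ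
      = (PySem.List.pyRange a b 1).foldl (fun g p => g * 2 + (if bit p then 1 else 0)) γ := by
  apply PySem.List.foldl_congr_mem
  intro acc x hx
  have hx' := (PySem.List.mem_pyRange_one).mp hx
  have hpos : x > 0 := by omega
  by_cases hb : bit x <;> simp [hb, hpos]

-- ===== VERDICT (by name: the statement is the Claim_ definition above) =====
theorem get_gamma_rate_spec : Claim_equal_get_gamma_rate := by
  intro rows lw _ _
  unfold Spec_get_gamma_rate get_gamma_rate get_gamma_rate_alt
  by_cases hlw : lw ≤ 0
  · simp [PySem.List.pyRange_one_eq_nil hlw]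
  · push_neg at hlw
    dsimp only
    rw [PySem.List.foldl_prod_mk (f := fun c line => pvBump '1' line c)
      (g := fun c line => pvBump '0' line c)]
    dsimp only
    have key : ∀ t : Char, ∀ p : Int, p ∈ PySem.List.pyRange 0 lw 1 →
        PySem.List.pyGetD
            (List.foldl (fun c line => pvBump t line c) (List.replicate lw.toNat 0) rows) p 0
          = pvColCount t rows p := by
      intro t p hp
      obtain ⟨h0p, hpl⟩ := (PySem.List.mem_pyRange_one).mp hp
      rw [show p = ((p.toNat : Nat) : Int) by omega, PySem.List.pyGetD_natCast]
      rw [pvFoldBump_getD t rows _ p.toNat (by simp; omega)]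
      simp [List.getD_eq_getElem?_getD, List.getElem?_replicate, show p.toNat < lw.toNat by omega]
    have hA := PySem.List.foldl_congr_mem
      (l := PySem.List.pyRange 0 lw 1) (init := (0 : Int))
      (f := fun gamma position =>
        if (List.foldl (fun (zo : Int × Int) line =>
              if PySem.Str.pyGet? line position = some '0' then (zo.1 + 1, zo.2)
              else if PySem.Str.pyGet? line position = some '1' then (zo.1, zo.2 + 1) else zo)
            (0, 0) rows).2 >
           (List.foldl (fun (zo : Int × Int) line =>
              if PySem.Str.pyGet? line position = some '0' then (zo.1 + 1, zo.2)
              else if PySem.Str.pyGet? line position = some '1' then (zo.1, zo.2 + 1) else zo)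
            (0, 0) rows).1
        then (if position > 0 then gamma * 2 else gamma) + 1
        else if position > 0 then gamma * 2 else gamma)
      (g := fun gamma p =>
        if pvColCount '1' rows p > pvColCount '0' rows p
        then (if p > 0 then gamma * 2 else gamma) + 1
        else if p > 0 then gamma * 2 else gamma)
      (by
        intro acc x _
        dsimp only
        have hzo : List.foldl (fun (zo : Int × Int) line =>
              if PySem.Str.pyGet? line x = some '0' then (zo.1 + 1, zo.2)
              else if PySem.Str.pyGet? line x = some '1' then (zo.1, zo.2 + 1) else zo) (0, 0) rows
            = (pvColCount '0' rows x, pvColCount '1' rows x) := by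
          simpa using pvInnerCount rows x 0 0
        rw [hzo])
    have hB := PySem.List.foldl_congr_mem
      (l := PySem.List.pyRange 0 lw 1) (init := (0 : Int))
      (f := fun gamma p => gamma * 2 +
        if PySem.List.pyGetD
              (List.foldl (fun c line => pvBump '1' line c) (List.replicate lw.toNat 0) rows) p 0 >
           PySem.List.pyGetD
              (List.foldl (fun c line => pvBump '0' line c) (List.replicate lw.toNat 0) rows) p 0
        then 1 else 0)
      (g := fun gamma p => gamma * 2 +
        if pvColCount '1' rows p > pvColCount '0' rows p then 1 else 0)
      (by intro acc x hx; dsimp only; rw [key '1' x hx, key '0' x hx])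
    rw [hA, hB]
    rw [PySem.List.pyRange_one_cons hlw]
    simp only [List.foldl_cons]
    norm_num
    exact pvTail (fun p => pvColCount '1' rows p > pvColCount '0' rows p) 1 lw (le_refl 1) _
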